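-- pv_equiv track=rewrite | github.com/hub3ps/delivery-fingerprint | scripts/shared_parser.py | _transitive_levels
-- ===== SOURCE A (Python) =====
-- def _transitive_levels(adj, start, max_depth=3):
--     """
--     BFS por níveis: retorna [ [nivel1], [nivel2], ... ] até max_depth.
--     Não repete nós já vistos.
--     """
--     from collections import deque
--     seen = {start}
--     q = deque([(start, 0)])
--     levels = [[] for _ in range(max_depth)]
--
--     while q:
--         u, d = q.popleft()
--         if d == max_depth:
--             continue
--         for v in sorted(adj.get(u, [])):
--             if v in seen:
--                 continue
--             seen.add(v)
--             levels[d].append(v)           # d=0 -> nível 1 a partir de start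
--             q.append((v, d+1))
--     # remove níveis vazios no fim
--     while levels and not levels[-1]:
--         levels.pop()
--     return levels
-- ===== SOURCE B (Python) =====
-- def _transitive_levels(adj, start, max_depth=3):
--     """Level-synchronous BFS: an explicit frontier per depth; stops as soon as a
--     level comes out empty, so no trailing-empty cleanup pass is needed."""
--     seen = {start}
--     current = [start]
--     levels = []
--     for _ in range(max_depth):
--         nxt = []
--         for u in current:
--             for v in sorted(adj.get(u, [])):
--                 if v not in seen:
--                     seen.add(v)
--                     nxt.append(v)
--         if not nxt:
--             break
--         levels.append(nxt)
--         current = nxt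
--     return levels
-- ===== Notes on version B (the rewrite author's own statement) =====
-- stated objective: simpler
-- what changed: Replaces the deque of (node, depth) pairs, preallocated per-depth level slots and trailing-empty strip loop with a level-synchronous BFS that rebuilds an explicit frontier list per round, appends each finished level and breaks as soon as a level is empty.
import Mathlib
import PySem

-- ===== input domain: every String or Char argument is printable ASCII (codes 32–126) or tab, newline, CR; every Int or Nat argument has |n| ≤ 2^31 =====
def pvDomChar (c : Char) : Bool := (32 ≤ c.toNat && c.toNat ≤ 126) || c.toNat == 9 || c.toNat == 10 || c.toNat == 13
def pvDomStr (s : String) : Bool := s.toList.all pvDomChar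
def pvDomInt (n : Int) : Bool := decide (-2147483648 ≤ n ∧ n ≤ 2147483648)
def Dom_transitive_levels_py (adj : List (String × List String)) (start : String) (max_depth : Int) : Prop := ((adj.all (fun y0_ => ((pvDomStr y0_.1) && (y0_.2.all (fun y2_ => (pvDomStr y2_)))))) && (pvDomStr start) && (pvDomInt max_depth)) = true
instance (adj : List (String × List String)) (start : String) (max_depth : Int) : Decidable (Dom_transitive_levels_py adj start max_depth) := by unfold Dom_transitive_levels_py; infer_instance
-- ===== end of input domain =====

-- B replaces A's deque of (node, depth) pairs and preallocated level slots by a level-synchronous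
-- frontier-list BFS (objective: simpler); return values proved equal on Pre_ (A raises outside it).

-- ===== PORT A =====
-- sorted(adj.get(u, []))  (adj is a dict: lookup = first match)
def pvNbrs (adj : List (String × List String)) (u : String) : List String :=
  PySem.List.sorted (PySem.Dict.getD ⟨adj⟩ u []) (fun v => v)

-- body of A's inner 'for v in sorted(adj.get(u, []))' loop, state (seen, q, levels), u popped with depth d.
-- levels[d].append(v): on every state A reaches d ≥ 0 (tags start at 0 and only d+1 is enqueued), so
-- Python's levels[d] is plain indexing at d.toNat (out of range = A's IndexError, excluded by Pre_).
def pvStepA (d : Int) (st : PySem.Set String × List (String × Int) × List (List String)) (v : String) :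
    PySem.Set String × List (String × Int) × List (List String) :=
  if st.1.contains v then st
  else (st.1.add v, st.2.1 ++ [(v, d + 1)], st.2.2.modify d.toNat (· ++ [v]))

-- number of adjacency-value strings not yet seen (termination measure only)
def pvUnseen (adj : List (String × List String)) (s : PySem.Set String) : Nat :=
  ((adj.map Prod.snd).flatten.filter (fun v => ! s.contains v)).length

theorem pvContains_add_of_contains (s : PySem.Set String) (v x : String)
    (hx : s.contains x = true) : (s.add v).contains x = true := by
  have hx' : x ∈ s := by simpa [PySem.Set.contains] using hx
  simp only [PySem.Set.add]
  split
  · exact hx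
  · simp only [PySem.Set.contains]
    simp [hx']

theorem pvFilter_add_lt (s : PySem.Set String) (v : String) (hs : s.contains v = false) :
    ∀ (l : List String), v ∈ l →
    (l.filter (fun x => ! (s.add v).contains x)).length + 1 ≤
      (l.filter (fun x => ! s.contains x)).length := by
  have hmono : ∀ (l : List String),
      (l.filter (fun x => ! (s.add v).contains x)).length ≤
        (l.filter (fun x => ! s.contains x)).length := by
    intro l
    induction l with
    | nil => simp
    | cons x l ihl =>
      simp only [List.filter_cons]
      cases h1 : PySem.Set.contains (s.add v) x with
      | true =>
        cases h2 : PySem.Set.contains s x with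
        | true => simpa using ihl
        | false => simp only [Bool.not_true, Bool.not_false, Bool.false_eq_true, if_false,
            if_true, List.length_cons]; omega
      | false =>
        have h2 : PySem.Set.contains s x = false := by
          cases h : PySem.Set.contains s x
          · rfl
          · rw [pvContains_add_of_contains s v x h] at h1; cases h1
        simp only [h2, Bool.not_false, if_true, List.length_cons]
        omega
  intro l hv
  induction l with
  | nil => cases hv
  | cons x l ih =>
    rcases List.mem_cons.mp hv with rfl | hx
    · have h1 : PySem.Set.contains (s.add v) v = true := by
        have hv' : ¬ v ∈ s := by simpa [PySem.Set.contains] using hs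
        simp [PySem.Set.add, PySem.Set.contains, hv']
      simp only [List.filter_cons, h1, hs, Bool.not_true, Bool.not_false, Bool.false_eq_true,
        if_false, if_true, List.length_cons]
      have := hmono l; omega
    · simp only [List.filter_cons]
      have hle := ih hx
      by_cases h1 : PySem.Set.contains (s.add v) x = true
      · by_cases h2 : PySem.Set.contains s x = true
        · simp only [h1, h2, Bool.not_true, Bool.false_eq_true, if_false]
          omega
        · have h2' := eq_false_of_ne_true h2
          simp only [h1, h2', Bool.not_true, Bool.not_false, Bool.false_eq_true, if_false, if_true,
            List.length_cons]
          omega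
      · have h1' := eq_false_of_ne_true h1
        have h2' : PySem.Set.contains s x = false := by
          cases h : PySem.Set.contains s x
          · rfl
          · rw [pvContains_add_of_contains s v x h] at h1'; cases h1'
        simp only [h1', h2', Bool.not_false, if_true, List.length_cons]
        omega

theorem pvUnseen_add_lt (adj : List (String × List String)) (s : PySem.Set String) (v : String)
    (hv : v ∈ (adj.map Prod.snd).flatten) (hs : s.contains v = false) :
    pvUnseen adj (s.add v) + 1 ≤ pvUnseen adj s :=
  pvFilter_add_lt s v hs _ hv

theorem pvNbrs_subset (adj : List (String × List String)) (u : String) (v : String)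
    (hv : v ∈ pvNbrs adj u) : v ∈ (adj.map Prod.snd).flatten := by
  unfold pvNbrs at hv
  rw [PySem.List.mem_sorted] at hv
  unfold PySem.Dict.getD PySem.Dict.get? at hv
  cases hfind : List.find? (fun p => p.1 == u) (PySem.Dict.mk adj).items with
  | none => simp [hfind] at hv
  | some p =>
    simp only [hfind, Option.map_some, Option.getD_some] at hv
    have hp : p ∈ adj := List.mem_of_find?_eq_some hfind
    exact List.mem_flatten.mpr ⟨p.2, List.mem_map.mpr ⟨p, hp, rfl⟩, hv⟩

theorem pvStepA_fold_measure (adj : List (String × List String)) (d : Int) :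
    ∀ (ns : List String), (∀ v ∈ ns, v ∈ (adj.map Prod.snd).flatten) →
    ∀ (seen : PySem.Set String) (q : List (String × Int)) (L : List (List String)),
    (ns.foldl (pvStepA d) (seen, q, L)).2.1.length + pvUnseen adj (ns.foldl (pvStepA d) (seen, q, L)).1
      ≤ q.length + pvUnseen adj seen := by
  intro ns
  induction ns with
  | nil => intro _ seen q L; simp
  | cons v ns ih =>
    intro hmem seen q L
    simp only [List.foldl_cons]
    by_cases hc : seen.contains v = true
    · simp only [pvStepA, hc, if_true]
      exact ih (fun w hw => hmem w (List.mem_cons_of_mem _ hw)) seen q L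
    · have hc' : seen.contains v = false := by cases h : seen.contains v; rfl; exact absurd h hc
      simp only [pvStepA, hc', if_false, Bool.false_eq_true]
      have h1 := ih (fun w hw => hmem w (List.mem_cons_of_mem _ hw)) (seen.add v)
        (q ++ [(v, d + 1)]) (L.modify d.toNat (· ++ [v]))
      have h2 := pvUnseen_add_lt adj seen v (hmem v (List.mem_cons_self)) hc'
      simp only [List.length_append, List.length_cons, List.length_nil] at h1
      omega

-- A's while-q loop (deque: pop at head, append at tail)
def pvLoopA (adj : List (String × List String)) (max_depth : Int)
    (seen : PySem.Set String) (q : List (String × Int)) (levels : List (List String)) :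
    List (List String) :=
  match q with
  | [] => levels
  | (u, d) :: q' =>
    if d == max_depth then pvLoopA adj max_depth seen q' levels
    else
      let st := (pvNbrs adj u).foldl (pvStepA d) (seen, q', levels)
      pvLoopA adj max_depth st.1 st.2.1 st.2.2
termination_by q.length + pvUnseen adj seen
decreasing_by
  · simp only [List.length_cons]; omega
  · have := pvStepA_fold_measure adj d (pvNbrs adj u) (fun v hv => pvNbrs_subset adj u v hv)
      seen q' levels
    simp only [List.length_cons]
    omega

-- 'while levels and not levels[-1]: levels.pop()' removes the maximal all-empty tail;
-- ported on the reversed list (same value; popping from the end = dropping from the reversed front)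
def pvStripRev : List (List String) → List (List String)
  | [] :: t => pvStripRev t
  | t => t

def pvStripTail (ls : List (List String)) : List (List String) :=
  (pvStripRev ls.reverse).reverse

def transitive_levels_py (adj : List (String × List String)) (start : String) (max_depth : Int) :
    List (List String) :=
  pvStripTail (pvLoopA adj max_depth (PySem.Set.ofList [start]) [(start, 0)]
    (List.replicate max_depth.toNat []))

-- ===== PORT B =====
-- body of B's innermost 'for v in sorted(adj.get(u, []))' loop, state (seen, nxt)
def pvStepB (st : PySem.Set String × List String) (v : String) : PySem.Set String × List String :=
  if st.1.contains v then st else (st.1.add v, st.2 ++ [v])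

-- 'for u in current: for v in …'  — one round building the next frontier
def pvFrontier (adj : List (String × List String)) (cur : List String)
    (st : PySem.Set String × List String) : PySem.Set String × List String :=
  cur.foldl (fun st u => (pvNbrs adj u).foldl pvStepB st) st

-- 'for _ in range(max_depth)' with 'if not nxt: break'  (range(max_depth) has max_depth.toNat elements)
def pvLoopB (adj : List (String × List String)) :
    Nat → PySem.Set String → List String → List (List String) → List (List String)
  | 0, _, _, levels => levels
  | n + 1, seen, cur, levels =>
    let st := pvFrontier adj cur (seen, [])
    if st.2 = [] then levels
    else pvLoopB adj n st.1 st.2 (levels ++ [st.2])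

def transitive_levels_py_alt (adj : List (String × List String)) (start : String) (max_depth : Int) :
    List (List String) :=
  pvLoopB adj max_depth.toNat (PySem.Set.ofList [start]) [start] []

-- ===== PRECONDITION & SPEC =====
-- Pre_ excludes exactly the inputs where A raises IndexError: max_depth < 0 while start has a
-- neighbor other than itself (then A appends into the empty preallocated levels list).
def Pre_transitive_levels_py (adj : List (String × List String)) (start : String) (max_depth : Int) : Prop :=
  0 ≤ max_depth ∨ ∀ v ∈ PySem.Dict.getD (⟨adj⟩ : PySem.Dict String (List String)) start [], v = start
instance (adj : List (String × List String)) (start : String) (max_depth : Int) :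
    Decidable (Pre_transitive_levels_py adj start max_depth) := by
  unfold Pre_transitive_levels_py; infer_instance
def pvWitness_transitive_levels_py : (List (String × List String)) × String × Int :=
  ([("a", ["b", "c"]), ("b", ["d"])], "a", 2)

def Spec_transitive_levels_py (adj : List (String × List String)) (start : String) (max_depth : Int)
    (out : List (List String)) : Prop := out = transitive_levels_py_alt adj start max_depth
instance (adj : List (String × List String)) (start : String) (max_depth : Int)
    (out : List (List String)) : Decidable (Spec_transitive_levels_py adj start max_depth out) := by
  unfold Spec_transitive_levels_py; infer_instance

-- ===== CLAIM (what is proved, stated in full; the proofs are below) =====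
def Claim_equal_transitive_levels_py : Prop := ∀ (adj : List (String × List String)) (start : String) (max_depth : Int), Dom_transitive_levels_py adj start max_depth → Pre_transitive_levels_py adj start max_depth → Spec_transitive_levels_py adj start max_depth (transitive_levels_py adj start max_depth)
-- ===== LEMMAS AND PROOFS =====

-- accumulator lemma for B's innermost fold
theorem pvStepB_fold_acc (ns : List String) :
    ∀ (s : PySem.Set String) (a b : List String),
    ns.foldl pvStepB (s, a ++ b) =
      ((ns.foldl pvStepB (s, b)).1, a ++ (ns.foldl pvStepB (s, b)).2) := by
  induction ns with
  | nil => intro s a b; simp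
  | cons v ns ih =>
    intro s a b
    simp only [List.foldl_cons, pvStepB]
    by_cases hc : s.contains v = true
    · simp only [hc, if_true]; exact ih s a b
    · simp only [hc, if_false, Bool.false_eq_true]
      have := ih (s.add v) a (b ++ [v])
      simpa [List.append_assoc] using this

theorem pvFrontier_acc (adj : List (String × List String)) (cur : List String) :
    ∀ (s : PySem.Set String) (a b : List String),
    pvFrontier adj cur (s, a ++ b) =
      ((pvFrontier adj cur (s, b)).1, a ++ (pvFrontier adj cur (s, b)).2) := by
  induction cur with
  | nil => intro s a b; simp [pvFrontier]
  | cons u cur ih =>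
    intro s a b
    simp only [pvFrontier, List.foldl_cons]
    rw [pvStepB_fold_acc (pvNbrs adj u) s a b]
    have := ih (((pvNbrs adj u).foldl pvStepB (s, b)).1) a (((pvNbrs adj u).foldl pvStepB (s, b)).2)
    simpa [pvFrontier] using this

-- A's inner neighbor loop equals B's with the queue/level bookkeeping made explicit
theorem pvInner_eq (d : Int) (P rest : List (List String)) (hP : P.length = d.toNat)
    (ns : List String) :
    ∀ (seen : PySem.Set String) (q : List (String × Int)) (cl : List String),
    ns.foldl (pvStepA d) (seen, q, P ++ cl :: rest) =
      ((ns.foldl pvStepB (seen, [])).1,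
       q ++ (ns.foldl pvStepB (seen, [])).2.map (fun v => (v, d + 1)),
       P ++ (cl ++ (ns.foldl pvStepB (seen, [])).2) :: rest) := by
  induction ns with
  | nil => intro seen q cl; simp
  | cons v ns ih =>
    intro seen q cl
    simp only [List.foldl_cons, pvStepA, pvStepB]
    by_cases hc : seen.contains v = true
    · simp only [hc, if_true]; exact ih seen q cl
    · simp only [hc, if_false, Bool.false_eq_true]
      have hmod : (P ++ cl :: rest).modify d.toNat (· ++ [v]) = P ++ (cl ++ [v]) :: rest := by
        rw [← hP]
        rw [List.modify_eq_set_getElem?]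
        simp [List.set_append_right]
      rw [hmod]
      rw [ih (seen.add v) (q ++ [(v, d + 1)]) (cl ++ [v])]
      have hacc := pvStepB_fold_acc ns (seen.add v) [v] []
      simp only [List.append_nil] at hacc
      simp only [List.nil_append]
      rw [hacc]
      simp [List.append_assoc]

-- draining the queue when every remaining entry carries depth max_depth
theorem pvLoopA_drain (adj : List (String × List String)) (max_depth : Int) :
    ∀ (cur : List String) (seen : PySem.Set String) (L : List (List String)),
    pvLoopA adj max_depth seen (cur.map (fun u => (u, max_depth))) L = L := by
  intro cur
  induction cur with
  | nil => intro seen L; simp [pvLoopA]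
  | cons u cur ih =>
    intro seen L
    rw [List.map_cons, pvLoopA]
    simp only [beq_self_eq_true, if_true]
    exact ih seen L

-- one whole level of A's loop = one frontier round of B
theorem pvLevel_eq (adj : List (String × List String)) (max_depth d : Int)
    (hd : (d == max_depth) = false)
    (P rest : List (List String)) (hP : P.length = d.toNat) :
    ∀ (cur : List String) (seen : PySem.Set String) (pend : List String) (cl : List String),
    pvLoopA adj max_depth seen
        (cur.map (fun u => (u, d)) ++ pend.map (fun v => (v, d + 1))) (P ++ cl :: rest) =
      pvLoopA adj max_depth (pvFrontier adj cur (seen, [])).1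
        ((pend ++ (pvFrontier adj cur (seen, [])).2).map (fun v => (v, d + 1)))
        (P ++ (cl ++ (pvFrontier adj cur (seen, [])).2) :: rest) := by
  intro cur
  induction cur with
  | nil => intro seen pend cl; simp [pvFrontier]
  | cons u cur ih =>
    intro seen pend cl
    rw [List.map_cons, List.cons_append, pvLoopA]
    simp only [hd, if_false, Bool.false_eq_true]
    rw [pvInner_eq d P rest hP (pvNbrs adj u) seen
      (cur.map (fun u => (u, d)) ++ pend.map (fun v => (v, d + 1))) cl]
    have hq : (cur.map (fun u => (u, d)) ++ pend.map (fun v => (v, d + 1))) ++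
        ((pvNbrs adj u).foldl pvStepB (seen, [])).2.map (fun v => (v, d + 1)) =
        cur.map (fun u => (u, d)) ++
          (pend ++ ((pvNbrs adj u).foldl pvStepB (seen, [])).2).map (fun v => (v, d + 1)) := by
      simp [List.append_assoc]
    simp only []
    rw [hq]
    rw [ih (((pvNbrs adj u).foldl pvStepB (seen, [])).1)
      (pend ++ ((pvNbrs adj u).foldl pvStepB (seen, [])).2)
      (cl ++ ((pvNbrs adj u).foldl pvStepB (seen, [])).2)]
    have hF : pvFrontier adj (u :: cur) (seen, []) =
        ((pvFrontier adj cur (((pvNbrs adj u).foldl pvStepB (seen, [])).1, [])).1,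
         ((pvNbrs adj u).foldl pvStepB (seen, [])).2 ++
           (pvFrontier adj cur (((pvNbrs adj u).foldl pvStepB (seen, [])).1, [])).2) := by
      show pvFrontier adj cur ((pvNbrs adj u).foldl pvStepB (seen, [])) = _
      have : ((pvNbrs adj u).foldl pvStepB (seen, [])) =
          (((pvNbrs adj u).foldl pvStepB (seen, [])).1,
           ((pvNbrs adj u).foldl pvStepB (seen, [])).2 ++ []) := by simp
      rw [this, pvFrontier_acc]
      simp
    rw [hF]
    simp [List.append_assoc]

-- B's generated levels, detached from the accumulator
def pvGenB (adj : List (String × List String)) :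
    Nat → PySem.Set String → List String → List (List String)
  | 0, _, _ => []
  | n + 1, seen, cur =>
    (pvFrontier adj cur (seen, [])).2 ::
      pvGenB adj n (pvFrontier adj cur (seen, [])).1 (pvFrontier adj cur (seen, [])).2

theorem pvStripRev_replicate_append (r : List (List String)) :
    ∀ (n : Nat), pvStripRev (List.replicate n [] ++ r) = pvStripRev r := by
  intro n
  induction n with
  | zero => simp
  | succ n ih => rw [List.replicate_succ, List.cons_append, pvStripRev]; exact ih

theorem pvStripTail_append_replicate (L : List (List String)) (hL : ∀ l ∈ L, l ≠ []) (n : Nat) :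
    pvStripTail (L ++ List.replicate n []) = L := by
  unfold pvStripTail
  rw [List.reverse_append, List.reverse_replicate, pvStripRev_replicate_append]
  cases hrev : L.reverse with
  | nil =>
    have hLnil : L = [] := by simpa using congrArg List.reverse hrev
    subst hLnil
    rfl
  | cons x t =>
    have hx : x ∈ L := by
      have : x ∈ L.reverse := by rw [hrev]; exact List.mem_cons_self
      simpa using this
    have hx' : x ≠ [] := hL x hx
    cases x with
    | nil => exact absurd rfl hx'
    | cons a as =>
      have hstep : pvStripRev ((a :: as) :: t) = (a :: as) :: t := by
        rw [pvStripRev]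
        intro t1 ht
        simp at ht
      rw [hstep, ← hrev, List.reverse_reverse]

theorem pvGenB_nil (adj : List (String × List String)) :
    ∀ (n : Nat) (seen : PySem.Set String), pvGenB adj n seen [] = List.replicate n [] := by
  intro n
  induction n with
  | zero => intro seen; rfl
  | succ n ih =>
    intro seen
    simp only [pvGenB, pvFrontier, List.foldl_nil, List.replicate_succ]
    exact congrArg _ (ih seen)

-- stripping A's trailing empty levels = B's early break
theorem pvStrip_genB_eq_loopB (adj : List (String × List String)) :
    ∀ (n : Nat) (seen : PySem.Set String) (cur : List String) (L : List (List String)),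
    (∀ l ∈ L, l ≠ []) →
    pvStripTail (L ++ pvGenB adj n seen cur) = pvLoopB adj n seen cur L := by
  intro n
  induction n with
  | zero =>
    intro seen cur L hL
    simpa [pvGenB, pvLoopB] using pvStripTail_append_replicate L hL 0
  | succ n ih =>
    intro seen cur L hL
    simp only [pvGenB, pvLoopB]
    by_cases h : (pvFrontier adj cur (seen, [])).2 = []
    · rw [h, pvGenB_nil]
      simp only [if_true]
      have := pvStripTail_append_replicate L hL (n + 1)
      simpa [List.replicate_succ] using this
    · simp only [h, if_false]
      have h2 : L ++ (pvFrontier adj cur (seen, [])).2 :: pvGenB adj n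
          (pvFrontier adj cur (seen, [])).1 (pvFrontier adj cur (seen, [])).2 =
          (L ++ [(pvFrontier adj cur (seen, [])).2]) ++ pvGenB adj n
          (pvFrontier adj cur (seen, [])).1 (pvFrontier adj cur (seen, [])).2 := by simp
      rw [h2, ih _ _ (L ++ [(pvFrontier adj cur (seen, [])).2]) ?_]
      intro l hl
      rcases List.mem_append.mp hl with hl | hl
      · exact hL l hl
      · simp only [List.mem_singleton] at hl; subst hl; exact h

theorem pvOuter_eq (adj : List (String × List String)) (max_depth : Int) :
    ∀ (n : Nat) (d : Int), d + n = max_depth → 0 ≤ d →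
    ∀ (seen : PySem.Set String) (cur : List String) (P : List (List String)),
    P.length = d.toNat →
    pvLoopA adj max_depth seen (cur.map (fun u => (u, d))) (P ++ List.replicate n []) =
      P ++ pvGenB adj n seen cur := by
  intro n
  induction n with
  | zero =>
    intro d hdn hd0 seen cur P hP
    have : d = max_depth := by omega
    subst this
    simp [pvLoopA_drain, pvGenB]
  | succ n ih =>
    intro d hdn hd0 seen cur P hP
    have hd : (d == max_depth) = false := by
      rw [beq_eq_false_iff_ne]; omega
    rw [List.replicate_succ]
    have h1 : cur.map (fun u => (u, d)) =
        cur.map (fun u => (u, d)) ++ ([] : List String).map (fun v => (v, d + 1)) := by simp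
    rw [h1, pvLevel_eq adj max_depth d hd P (List.replicate n []) hP cur seen [] []]
    simp only [List.nil_append]
    have h2 : P ++ (pvFrontier adj cur (seen, [])).2 :: List.replicate n [] =
        (P ++ [(pvFrontier adj cur (seen, [])).2]) ++ List.replicate n [] := by simp
    rw [h2, ih (d + 1) (by omega) (by omega) (pvFrontier adj cur (seen, [])).1
      (pvFrontier adj cur (seen, [])).2 (P ++ [(pvFrontier adj cur (seen, [])).2]) (by simp; omega)]
    simp [pvGenB]

-- the degenerate allowed max_depth < 0 case: every neighbor of start is start itself, nothing happens
theorem pvFold_skip (d : Int) (ns : List String) (seen : PySem.Set String)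
    (q : List (String × Int)) (L : List (List String)) (h : ∀ v ∈ ns, seen.contains v = true) :
    ns.foldl (pvStepA d) (seen, q, L) = (seen, q, L) := by
  induction ns with
  | nil => rfl
  | cons v ns ih =>
    simp only [List.foldl_cons, pvStepA, h v List.mem_cons_self, if_true]
    exact ih (fun w hw => h w (List.mem_cons_of_mem _ hw))

-- ===== VERDICT (by name: the statement is the Claim_ definition above) =====
theorem transitive_levels_py_spec : Claim_equal_transitive_levels_py := by
  intro adj start max_depth _hdom hpre
  unfold Spec_transitive_levels_py transitive_levels_py transitive_levels_py_alt
  by_cases hmd : 0 ≤ max_depth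
  · have h1 : [((start : String), (0 : Int))] = [start].map (fun u => (u, (0 : Int))) := rfl
    have h2 : List.replicate max_depth.toNat ([] : List String) =
        [] ++ List.replicate max_depth.toNat [] := rfl
    rw [h1, h2, pvOuter_eq adj max_depth max_depth.toNat 0 (by omega) le_rfl
      (PySem.Set.ofList [start]) [start] [] rfl]
    rw [List.nil_append, show (pvGenB adj max_depth.toNat (PySem.Set.ofList [start]) [start]) =
      [] ++ pvGenB adj max_depth.toNat (PySem.Set.ofList [start]) [start] from rfl]
    exact pvStrip_genB_eq_loopB adj max_depth.toNat (PySem.Set.ofList [start]) [start] []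
      (by intro l hl; cases hl)
  · -- max_depth < 0: Pre_ forces every neighbor of start to be start itself; both sides are []
    have hself : ∀ v ∈ PySem.Dict.getD (⟨adj⟩ : PySem.Dict String (List String)) start [],
        v = start := by
      rcases hpre with h | h
      · omega
      · exact h
    have htn : max_depth.toNat = 0 := by omega
    rw [htn]
    simp only [List.replicate, pvLoopB]
    rw [pvLoopA]
    have hne : ((0 : Int) == max_depth) = false := by rw [beq_eq_false_iff_ne]; omega
    simp only [hne, if_false, Bool.false_eq_true]
    rw [pvFold_skip]
    · rw [pvLoopA]
      rfl
    · intro v hv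
      have : v = start := hself v (by
        have := hv
        unfold pvNbrs at this
        exact (PySem.List.mem_sorted _ _ _ _).mp this)
      subst this
      simp [PySem.Set.ofList, PySem.Set.add, PySem.Set.contains, PySem.Set.empty]
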